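-- pv_equiv track=rewrite | github.com/OttoKuosmanen/reddit_data | scripts/clean.py | sensor
-- ===== SOURCE A (Python) =====
-- def sensor(questions, exclude):
--     results = []
--     for q in questions:
--         text = q.upper()
--         if not any(item.upper() in text for item in exclude):
--             results.append(q)
--         else:
--             results.append("REMOVE")
--     return results
-- ===== SOURCE B (Python) =====
-- def sensor(questions, exclude):
--     # Alternative strategy: swap the loops. Uppercase both sides once, then for
--     # each excluded needle do one marking pass over the texts; finally render.
--     needles = [item.upper() for item in exclude]
--     texts = [q.upper() for q in questions]
--     marked = [False] * len(questions)
--     for needle in needles: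
--         marked = [m or (needle in t) for m, t in zip(marked, texts)]
--     return ["REMOVE" if m else q for q, m in zip(questions, marked)]
-- ===== Notes on version B (the rewrite author's own statement) =====
-- stated objective: alternative
-- what changed: B swaps the loop nesting: it uppercases all questions and all exclude items once up front, then runs one marking pass over the question texts per needle accumulating a boolean mark list, and finally renders marks to 'REMOVE'/original, instead of A's per-question any() scan that re-uppercases every exclude item for every question.
import Mathlib
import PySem

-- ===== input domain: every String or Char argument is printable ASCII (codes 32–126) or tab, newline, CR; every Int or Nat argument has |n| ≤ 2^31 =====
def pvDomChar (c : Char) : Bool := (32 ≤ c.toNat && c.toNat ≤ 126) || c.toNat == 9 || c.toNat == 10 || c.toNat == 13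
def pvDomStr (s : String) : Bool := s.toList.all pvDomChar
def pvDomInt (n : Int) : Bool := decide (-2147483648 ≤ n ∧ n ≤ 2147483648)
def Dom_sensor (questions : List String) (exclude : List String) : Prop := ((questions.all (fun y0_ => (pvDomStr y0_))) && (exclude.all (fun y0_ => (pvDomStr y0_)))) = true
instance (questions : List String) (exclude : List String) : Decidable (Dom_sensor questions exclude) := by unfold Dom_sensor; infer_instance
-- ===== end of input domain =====

-- B swaps the loop nesting (uppercase everything once, one marking pass per needle,
-- then render marks); proved to return exactly A's output on all inputs.


-- ===== PORT A =====
def sensor (questions : List String) (exclude : List String) : List String :=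
  questions.foldl (fun results q =>
    let text := PySem.Str.upper q
    if !(exclude.any (fun item => PySem.Str.isIn (PySem.Str.upper item) text)) then
      results ++ [q]
    else
      results ++ ["REMOVE"]) []

-- ===== PORT B =====
def sensor_alt (questions : List String) (exclude : List String) : List String :=
  let needles := exclude.map PySem.Str.upper
  let texts := questions.map PySem.Str.upper
  let marked0 : List Bool := questions.map (fun _ => false)
  let marked := needles.foldl (fun marked needle =>
    List.zipWith (fun m t => m || PySem.Str.isIn needle t) marked texts) marked0
  (questions.zip marked).map (fun qm => if qm.2 then "REMOVE" else qm.1)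

-- ===== PRECONDITION & SPEC =====
def Spec_sensor (questions : List String) (exclude : List String) (out : List String) : Prop := out = sensor_alt questions exclude
instance (questions : List String) (exclude : List String) (out : List String) : Decidable (Spec_sensor questions exclude out) := by unfold Spec_sensor; infer_instance

-- ===== CLAIM (what is proved, stated in full; the proofs are below) =====
def Claim_equal_sensor : Prop := ∀ (questions : List String) (exclude : List String), Dom_sensor questions exclude → Spec_sensor questions exclude (sensor questions exclude)

-- ===== LEMMAS AND PROOFS =====

-- A's loop is a map: appended element is `if c then q else "REMOVE"`.
theorem sensor_foldl_eq_map (exclude : List String) (qs : List String) (acc : List String) :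
    qs.foldl (fun results q =>
      if !(exclude.any (fun item => PySem.Str.isIn (PySem.Str.upper item) (PySem.Str.upper q))) then
        results ++ [q]
      else
        results ++ ["REMOVE"]) acc
    = acc ++ qs.map (fun q =>
        if exclude.any (fun item => PySem.Str.isIn (PySem.Str.upper item) (PySem.Str.upper q)) then
          "REMOVE" else q) := by
  induction qs generalizing acc with
  | nil => simp
  | cons q t ih =>
    simp only [List.foldl_cons, List.map_cons, ih]
    cases h : exclude.any (fun item => PySem.Str.isIn (PySem.Str.upper item) (PySem.Str.upper q)) <;>
      simp [h]

-- one marking pass fused pointwise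
theorem zipWith_or_self {α : Type} (f : α → Bool) (g : α → Bool) :
    ∀ (texts : List α) (marked : List Bool), marked.length = texts.length →
    List.zipWith (fun m t => m || f t) (List.zipWith (fun m t => m || g t) marked texts) texts
    = List.zipWith (fun m t => m || (g t || f t)) marked texts := by
  intro texts
  induction texts with
  | nil => intro marked _; simp
  | cons t ts ih =>
    intro marked h
    cases marked with
    | nil => simp at h
    | cons m ms =>
      simp only [List.zipWith_cons_cons, Bool.or_assoc]
      exact congrArg _ (ih ms (by simpa using h))

theorem zipWith_fst {α : Type} :
    ∀ (texts : List α) (marked : List Bool), marked.length = texts.length →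
    List.zipWith (fun m (_ : α) => m) marked texts = marked := by
  intro texts
  induction texts with
  | nil => intro marked h; cases marked <;> simp_all
  | cons t ts ih =>
    intro marked h
    cases marked with
    | nil => simp at h
    | cons m ms => simp only [List.zipWith_cons_cons]; rw [ih ms (by simpa using h)]

-- the B fold computes the per-text disjunction over all needles
theorem fold_marks (needles : List String) :
    ∀ (texts : List String) (marked : List Bool), marked.length = texts.length →
    needles.foldl (fun marked needle =>
      List.zipWith (fun m t => m || PySem.Str.isIn needle t) marked texts) marked
    = List.zipWith (fun m t => m || needles.any (fun n => PySem.Str.isIn n t)) marked texts := by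
  induction needles with
  | nil =>
    intro texts marked h
    simp only [List.foldl_nil, List.any_nil, Bool.or_false]
    exact (zipWith_fst texts marked h).symm
  | cons n ns ih =>
    intro texts marked h
    simp only [List.foldl_cons]
    rw [ih texts _ (by simp [h, List.length_zipWith]), zipWith_or_self _ _ texts marked h]
    simp [List.any_cons]

theorem sensor_alt_eq_map (questions exclude : List String) :
    sensor_alt questions exclude
    = questions.map (fun q =>
        if exclude.any (fun item => PySem.Str.isIn (PySem.Str.upper item) (PySem.Str.upper q)) then
          "REMOVE" else q) := by
  simp only [sensor_alt]
  rw [fold_marks _ _ _ (by simp)]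
  induction questions with
  | nil => simp
  | cons q qs ih =>
    simp only [List.map_cons, List.zipWith_cons_cons, List.zip_cons_cons, Bool.false_or,
      List.any_map] at *
    rw [ih]
    simp

-- ===== VERDICT (by name: the statement is the Claim_ definition above) =====
theorem sensor_spec : Claim_equal_sensor := by
  intro questions exclude _
  unfold Spec_sensor sensor
  rw [sensor_foldl_eq_map, sensor_alt_eq_map]
  simp
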